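-- pv_equiv track=rewrite | github.com/tksgtkm/programming_exercise | python/algorithms/pftp/ch02/partysmart_soln1.py | chooseTimeConstrained
-- ===== SOURCE A (Python) =====
-- def chooseTimeConstrained(times, ystart, yend):
--     rcount = 0
--     maxcount = 0
--     time = 0
--
--     for t in times:
--         if t[1] == 'start':
--             rcount = rcount + 1
--         elif t[1] == 'end':
--             rcount = rcount - 1
--         if rcount > maxcount and t[0] >= ystart and t[0] < yend:
--             maxcount = rcount
--             time = t[0]
--
--     return maxcount, time
-- ===== SOURCE B (Python) =====
-- def chooseTimeConstrained(times, ystart, yend):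
--     # prefix sums of +1/-1/0 deltas
--     counts = []
--     c = 0
--     for _, label in times:
--         if label == 'start':
--             c += 1
--         elif label == 'end':
--             c -= 1
--         counts.append(c)
--     candidates = [(c, t) for (t, _), c in zip(times, counts)
--                   if ystart <= t < yend and c > 0]
--     return max(candidates, key=lambda p: p[0], default=(0, 0))
-- ===== Notes on version B (the rewrite author's own statement) =====
-- stated objective: alternative
-- what changed: Replaced A's single stateful sweep (running count + strict-> running max in one loop) by three separate stages: materialize the prefix-sum count list, build the filtered candidate list (in-window events with positive count), then select the first maximal candidate with max(key, default=(0,0)).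
import Mathlib
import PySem

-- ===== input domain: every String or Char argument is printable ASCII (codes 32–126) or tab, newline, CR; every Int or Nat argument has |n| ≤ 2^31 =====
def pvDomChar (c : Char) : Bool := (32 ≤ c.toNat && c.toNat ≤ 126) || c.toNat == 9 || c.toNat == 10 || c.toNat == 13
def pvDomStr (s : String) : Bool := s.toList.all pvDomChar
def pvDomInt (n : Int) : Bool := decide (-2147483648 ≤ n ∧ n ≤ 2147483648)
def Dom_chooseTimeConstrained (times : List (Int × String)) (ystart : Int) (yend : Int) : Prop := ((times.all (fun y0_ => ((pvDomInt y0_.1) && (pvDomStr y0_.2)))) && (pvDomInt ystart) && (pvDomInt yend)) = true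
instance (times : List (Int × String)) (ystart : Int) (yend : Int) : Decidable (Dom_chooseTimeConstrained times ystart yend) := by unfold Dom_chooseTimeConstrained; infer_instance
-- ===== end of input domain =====

-- B re-implements A's single running sweep as prefix-sum counts + filter + first-max selection (alternative decomposition, same cost); return value only, no mutation.

-- ===== PORT A =====
-- one loop iteration of A: state = (rcount, maxcount, time)
def pvStepA (ystart yend : Int) (st : Int × Int × Int) (t : Int × String) : Int × Int × Int :=
  let rcount := if t.2 == "start" then st.1 + 1 else if t.2 == "end" then st.1 - 1 else st.1
  if rcount > st.2.1 && t.1 ≥ ystart && t.1 < yend then (rcount, rcount, t.1)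
  else (rcount, st.2.1, st.2.2)

def chooseTimeConstrained (times : List (Int × String)) (ystart : Int) (yend : Int) : Int × Int :=
  let s := times.foldl (pvStepA ystart yend) (0, 0, 0)
  (s.2.1, s.2.2)

-- ===== PORT B =====
def pvDelta (lab : String) : Int := if lab == "start" then 1 else if lab == "end" then -1 else 0

-- the prefix-sum list `counts` of Source B
def pvCounts : List (Int × String) → Int → List Int
  | [], _ => []
  | t :: rest, c => let c' := c + pvDelta t.2; c' :: pvCounts rest c'

-- the `candidates` comprehension of Source B
def pvCands (ystart yend : Int) (l : List (Int × String)) (r : Int) : List (Int × Int) :=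
  (l.zip (pvCounts l r)).filterMap
    (fun p => if ystart ≤ p.1.1 && p.1.1 < yend && p.2 > 0 then some (p.2, p.1.1) else none)

-- exact port of Python max(candidates, key=lambda p: p[0], default): first maximal element, default if empty
def pvMaxFrom (best : Int × Int) : List (Int × Int) → Int × Int
  | [] => best
  | q :: rest => pvMaxFrom (if q.1 > best.1 then q else best) rest

def pvMaxD (default : Int × Int) : List (Int × Int) → Int × Int
  | [] => default
  | p :: rest => pvMaxFrom p rest

def chooseTimeConstrained_alt (times : List (Int × String)) (ystart : Int) (yend : Int) : Int × Int :=
  pvMaxD (0, 0) (pvCands ystart yend times 0)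

-- ===== PRECONDITION & SPEC =====
def Spec_chooseTimeConstrained (times : List (Int × String)) (ystart : Int) (yend : Int) (out : Int × Int) : Prop := out = chooseTimeConstrained_alt times ystart yend
instance (times : List (Int × String)) (ystart : Int) (yend : Int) (out : Int × Int) : Decidable (Spec_chooseTimeConstrained times ystart yend out) := by unfold Spec_chooseTimeConstrained; infer_instance

-- ===== CLAIM (what is proved, stated in full; the proofs are below) =====
def Claim_equal_chooseTimeConstrained : Prop := ∀ (times : List (Int × String)) (ystart : Int) (yend : Int), Dom_chooseTimeConstrained times ystart yend → Spec_chooseTimeConstrained times ystart yend (chooseTimeConstrained times ystart yend)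

-- ===== LEMMAS AND PROOFS =====

-- window-filtered pairs WITHOUT the positivity filter (proof-only intermediate)
def pvPairs (ystart yend : Int) (l : List (Int × String)) (r : Int) : List (Int × Int) :=
  (l.zip (pvCounts l r)).filterMap
    (fun p => if ystart ≤ p.1.1 && p.1.1 < yend then some (p.2, p.1.1) else none)

theorem stepA_eq (ystart yend r m tm : Int) (t : Int × String) :
    pvStepA ystart yend (r, m, tm) t =
      if ystart ≤ t.1 ∧ t.1 < yend ∧ m < r + pvDelta t.2
      then (r + pvDelta t.2, r + pvDelta t.2, t.1)
      else (r + pvDelta t.2, m, tm) := by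
  have hrc : (if t.2 == "start" then r + 1 else if t.2 == "end" then r - 1 else r)
      = r + pvDelta t.2 := by unfold pvDelta; split_ifs <;> omega
  simp only [pvStepA, hrc]
  by_cases h : ystart ≤ t.1 ∧ t.1 < yend ∧ m < r + pvDelta t.2
  · rw [if_pos (by simp only [Bool.and_eq_true, decide_eq_true_eq]; exact ⟨⟨h.2.2, h.1⟩, h.2.1⟩), if_pos h]
  · rw [if_neg (by simp only [Bool.and_eq_true, decide_eq_true_eq]; rintro ⟨⟨h1, h2⟩, h3⟩; exact h ⟨h2, h3, h1⟩), if_neg h]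

theorem pvPairs_cons (ystart yend : Int) (t : Int × String) (rest : List (Int × String)) (r : Int) :
    pvPairs ystart yend (t :: rest) r =
      (if ystart ≤ t.1 ∧ t.1 < yend then [(r + pvDelta t.2, t.1)] else [])
        ++ pvPairs ystart yend rest (r + pvDelta t.2) := by
  simp only [pvPairs, pvCounts, List.zip_cons_cons, List.filterMap_cons]
  by_cases h : ystart ≤ t.1 ∧ t.1 < yend
  · rw [if_pos (by simp only [Bool.and_eq_true, decide_eq_true_eq]; exact h), if_pos h]
    rfl
  · rw [if_neg (by simp only [Bool.and_eq_true, decide_eq_true_eq]; exact h), if_neg h]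
    rfl

theorem pvCands_cons (ystart yend : Int) (t : Int × String) (rest : List (Int × String)) (r : Int) :
    pvCands ystart yend (t :: rest) r =
      (if ystart ≤ t.1 ∧ t.1 < yend ∧ 0 < r + pvDelta t.2 then [(r + pvDelta t.2, t.1)] else [])
        ++ pvCands ystart yend rest (r + pvDelta t.2) := by
  simp only [pvCands, pvCounts, List.zip_cons_cons, List.filterMap_cons]
  by_cases h : ystart ≤ t.1 ∧ t.1 < yend ∧ 0 < r + pvDelta t.2
  · rw [if_pos (by simp only [Bool.and_eq_true, decide_eq_true_eq]; exact ⟨⟨h.1, h.2.1⟩, h.2.2⟩), if_pos h]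
    rfl
  · rw [if_neg (by simp only [Bool.and_eq_true, decide_eq_true_eq]; rintro ⟨⟨h1, h2⟩, h3⟩; exact h ⟨h1, h2, h3⟩), if_neg h]
    rfl

theorem foldA_eq (ystart yend : Int) :
    ∀ (l : List (Int × String)) (r m tm : Int),
      (l.foldl (pvStepA ystart yend) (r, m, tm)).2 = pvMaxFrom (m, tm) (pvPairs ystart yend l r) := by
  intro l
  induction l with
  | nil => intro r m tm; simp [pvPairs, pvCounts, pvMaxFrom]
  | cons t rest ih =>
    intro r m tm
    rw [List.foldl_cons, stepA_eq, pvPairs_cons]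
    by_cases hw : ystart ≤ t.1 ∧ t.1 < yend
    · by_cases hc : m < r + pvDelta t.2
      · rw [if_pos ⟨hw.1, hw.2, hc⟩, if_pos hw]
        simp only [List.singleton_append, pvMaxFrom, if_pos hc]
        exact ih _ _ _
      · rw [if_neg (fun h => hc h.2.2), if_pos hw]
        simp only [List.singleton_append, pvMaxFrom, if_neg hc]
        exact ih _ _ _
    · rw [if_neg (fun h => hw ⟨h.1, h.2.1⟩), if_neg hw]
      simp only [List.nil_append]
      exact ih _ _ _

theorem cands_eq_pairs (ystart yend : Int) :
    ∀ (l : List (Int × String)) (r : Int) (best : Int × Int), 0 ≤ best.1 →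
      pvMaxFrom best (pvCands ystart yend l r) = pvMaxFrom best (pvPairs ystart yend l r) := by
  intro l
  induction l with
  | nil => intro r best _; simp [pvCands, pvPairs, pvCounts]
  | cons t rest ih =>
    intro r best hb
    rw [pvCands_cons, pvPairs_cons]
    by_cases hw : ystart ≤ t.1 ∧ t.1 < yend
    · by_cases hc : 0 < r + pvDelta t.2
      · rw [if_pos ⟨hw.1, hw.2, hc⟩, if_pos hw]
        simp only [List.singleton_append, pvMaxFrom]
        by_cases hgt : r + pvDelta t.2 > best.1
        · rw [if_pos hgt]
          exact ih _ _ (by omega)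
        · rw [if_neg hgt]
          exact ih _ _ hb
      · rw [if_neg (fun h => hc h.2.2), if_pos hw]
        simp only [List.nil_append, List.singleton_append, pvMaxFrom]
        rw [if_neg (by omega)]
        exact ih _ _ hb
    · rw [if_neg (fun h => hw ⟨h.1, h.2.1⟩), if_neg hw]
      simp only [List.nil_append]
      exact ih _ _ hb

theorem cands_pos (ystart yend : Int) (l : List (Int × String)) (r : Int) :
    ∀ p ∈ pvCands ystart yend l r, 0 < p.1 := by
  intro p hp
  simp only [pvCands, List.mem_filterMap] at hp
  obtain ⟨q, _, hq⟩ := hp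
  by_cases h : (ystart ≤ q.1.1 && q.1.1 < yend && q.2 > 0) = true
  · rw [if_pos h] at hq
    simp only [Bool.and_eq_true, decide_eq_true_eq] at h
    cases hq
    exact h.2
  · rw [if_neg h] at hq; cases hq

theorem maxD_eq_from (l : List (Int × Int)) (h : ∀ p ∈ l, 0 < p.1) :
    pvMaxD (0, 0) l = pvMaxFrom (0, 0) l := by
  cases l with
  | nil => rfl
  | cons p rest =>
    simp only [pvMaxD, pvMaxFrom]
    rw [if_pos (h p (by simp))]

-- ===== VERDICT (by name: the statement is the Claim_ definition above) =====
theorem chooseTimeConstrained_spec : Claim_equal_chooseTimeConstrained := by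
  intro times ystart yend _
  show chooseTimeConstrained times ystart yend = chooseTimeConstrained_alt times ystart yend
  show ((List.foldl (pvStepA ystart yend) (0, 0, 0) times).2.1,
        (List.foldl (pvStepA ystart yend) (0, 0, 0) times).2.2)
      = pvMaxD (0, 0) (pvCands ystart yend times 0)
  rw [Prod.mk.eta, foldA_eq, maxD_eq_from _ (cands_pos ystart yend times 0),
      cands_eq_pairs ystart yend times 0 (0, 0) le_rfl]
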